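-- pv_equiv track=rewrite | github.com/meowpunch/meowrithm | python/leetcode/849. Maximize Distance to Closest Person.py | chunks_zero
-- ===== SOURCE A (Python) =====
-- from typing import List
--
-- def chunks_zero(lst: List[int]):
--     # first and last chunked zero * 2
--
--     count = 0
--     flag = 0
--
--     for idx, ele in enumerate(lst):
--         if idx == 0 and ele == 1:
--             flag = 1
--
--         if ele == 0:
--             count += 1
--         elif count == 0:
--             continue
--         else:
--             if flag == 0:
--                 # first
--                 flag = 1
--                 yield count * 2
--             else:
--                 yield count
--             count = 0
--
--     if count > 0:
--         # last
--         yield count * 2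
-- ===== SOURCE B (Python) =====
-- def chunks_zero(lst):
--     # Group-then-decorate: run-length encode first, then yield each zero-run
--     # length, doubled when it is the leading run (and the first element is not 1) or the trailing run.
--     groups = []
--     for x in lst:
--         if groups and groups[-1][0] == x:
--             groups[-1] = (x, groups[-1][1] + 1)
--         else:
--             groups.append((x, 1))
--     zruns = [n for v, n in groups if v == 0]
--     last = len(zruns) - 1
--     for k, n in enumerate(zruns):
--         if (k == 0 and lst[0] != 1) or (k == last and lst[-1] == 0):
--             yield 2 * n
--         else:
--             yield n
-- ===== Notes on version B (the rewrite author's own statement) =====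
-- stated objective: alternative
-- what changed: Replaced A's single-pass flag/accumulator generator by a two-phase pass: run-length encode the list into groups first, collect the zero-run lengths, then yield each length doubled exactly when it is the leading run and the first element is not 1, or when it is the trailing run.
import Mathlib
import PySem

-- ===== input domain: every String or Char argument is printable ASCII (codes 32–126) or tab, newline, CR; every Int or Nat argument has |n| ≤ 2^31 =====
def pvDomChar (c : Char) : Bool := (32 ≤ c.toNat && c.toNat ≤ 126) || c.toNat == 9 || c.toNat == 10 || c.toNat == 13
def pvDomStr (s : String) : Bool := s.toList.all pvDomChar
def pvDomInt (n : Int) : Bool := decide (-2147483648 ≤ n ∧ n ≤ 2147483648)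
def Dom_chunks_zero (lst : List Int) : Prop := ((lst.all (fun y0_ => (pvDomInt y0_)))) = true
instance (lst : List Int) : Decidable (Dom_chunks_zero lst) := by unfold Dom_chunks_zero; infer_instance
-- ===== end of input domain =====

-- B replaces A's flag/accumulator single pass by run-length encoding followed by a
-- decorated pass over the table of zero-run lengths (same cost; an alternative decomposition).

-- ===== PORT A =====
def chunks_zero (lst : List Int) : List Int :=
  let r := (PySem.List.enumerate lst 0).foldl (fun (st : Int × Int × List Int) ie =>
    let count := st.1
    let flag := st.2.1
    let acc := st.2.2
    let flag := if ie.1 = 0 ∧ ie.2 = 1 then 1 else flag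
    if ie.2 = 0 then (count + 1, flag, acc)
    else if count = 0 then (count, flag, acc)
    else if flag = 0 then (0, 1, acc ++ [count * 2])
    else (0, flag, acc ++ [count])) (0, 0, [])
  if r.1 > 0 then r.2.2 ++ [r.1 * 2] else r.2.2

-- ===== PORT B =====
def chunks_zero_alt (lst : List Int) : List Int :=
  let groups := lst.foldl (fun (gs : List (Int × Int)) x =>
    match gs.getLast? with
    | some (v, n) => if v = x then gs.dropLast ++ [(x, n + 1)] else gs ++ [(x, 1)]
    | none => gs ++ [(x, 1)]) []
  let zruns := (groups.filter (fun p => p.1 = 0)).map (fun p => p.2)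
  let lastIdx : Int := (zruns.length : Int) - 1
  (PySem.List.enumerate zruns 0).map (fun (kn : Int × Int) =>
    if (kn.1 = 0 ∧ PySem.List.pyGet? lst 0 ≠ some 1) ∨
       (kn.1 = lastIdx ∧ PySem.List.pyGet? lst (-1) = some 0)
    then 2 * kn.2 else kn.2)

-- ===== PRECONDITION & SPEC =====
def Spec_chunks_zero (lst : List Int) (out : List Int) : Prop := out = chunks_zero_alt lst
instance (lst : List Int) (out : List Int) : Decidable (Spec_chunks_zero lst out) := by unfold Spec_chunks_zero; infer_instance

-- ===== CLAIM (what is proved, stated in full; the proofs are below) =====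
def Claim_equal_chunks_zero : Prop := ∀ (lst : List Int), Dom_chunks_zero lst → Spec_chunks_zero lst (chunks_zero lst)


-- ===== LEMMAS AND PROOFS =====

-- A's loop body and B's grouping loop body, named for the proofs
def stepA (st : Int × Int × List Int) (ie : Int × Int) : Int × Int × List Int :=
  let count := st.1
  let flag := st.2.1
  let acc := st.2.2
  let flag := if ie.1 = 0 ∧ ie.2 = 1 then 1 else flag
  if ie.2 = 0 then (count + 1, flag, acc)
  else if count = 0 then (count, flag, acc)
  else if flag = 0 then (0, 1, acc ++ [count * 2])
  else (0, flag, acc ++ [count])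

def stepB (gs : List (Int × Int)) (x : Int) : List (Int × Int) :=
  match gs.getLast? with
  | some (v, n) => if v = x then gs.dropLast ++ [(x, n + 1)] else gs ++ [(x, 1)]
  | none => gs ++ [(x, 1)]

-- recursive reformulation of A
def recA : Int → Int → List Int → List Int
  | _, count, [] => if count > 0 then [count * 2] else []
  | flag, count, x :: xs =>
    if x = 0 then recA flag (count + 1) xs
    else if count = 0 then recA flag count xs
    else if flag = 0 then count * 2 :: recA 1 0 xs
    else count :: recA flag 0 xs

-- zero-run lengths of xs given a pending run of length c
def zrAux : Int → List Int → List Int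
  | c, [] => if c > 0 then [c] else []
  | c, x :: xs => if x = 0 then zrAux (c + 1) xs
    else if c > 0 then c :: zrAux 0 xs else zrAux 0 xs

-- "the trailing run of zeros is nonempty" given pending count c
def tb (c : Int) (xs : List Int) : Bool :=
  match xs.getLast? with
  | some v => v == 0
  | none => decide (c > 0)

-- double the last element iff t
def tailMap : Bool → List Int → List Int
  | _, [] => []
  | t, n :: xs => if xs = [] then [if t then 2 * n else n] else n :: tailMap t xs

-- B's decoration: double head iff h0 (or head is also trailing and t), double last iff t
def outB : Bool → Bool → List Int → List Int
  | _, _, [] => []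
  | h0, t, n :: rest =>
    (if h0 || (rest.isEmpty && t) then 2 * n else n) :: tailMap t rest

-- run-length encoding, head-recursively
def ext : Int → Int → List Int → List (Int × Int)
  | v, n, [] => [(v, n)]
  | v, n, x :: xs => if v = x then ext v (n + 1) xs else (v, n) :: ext x 1 xs

theorem chunks_zero_eq (lst : List Int) :
    chunks_zero lst =
      (if ((PySem.List.enumerate lst 0).foldl stepA (0, 0, [])).1 > 0 then
        ((PySem.List.enumerate lst 0).foldl stepA (0, 0, [])).2.2 ++
          [((PySem.List.enumerate lst 0).foldl stepA (0, 0, [])).1 * 2]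
      else ((PySem.List.enumerate lst 0).foldl stepA (0, 0, [])).2.2) := rfl

theorem chunks_zero_alt_eq (lst : List Int) :
    chunks_zero_alt lst =
      (PySem.List.enumerate
          (((lst.foldl stepB []).filter (fun p => p.1 = 0)).map (fun p => p.2)) 0).map
        (fun (kn : Int × Int) =>
          if (kn.1 = 0 ∧ PySem.List.pyGet? lst 0 ≠ some 1) ∨
             (kn.1 = ((((lst.foldl stepB []).filter (fun p => p.1 = 0)).map
                 (fun p => p.2)).length : Int) - 1 ∧
              PySem.List.pyGet? lst (-1) = some 0)
          then 2 * kn.2 else kn.2) := rfl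

theorem foldA (xs : List Int) : ∀ (s count flag : Int) (acc : List Int), 1 ≤ s →
    (if ((PySem.List.enumerate xs s).foldl stepA (count, flag, acc)).1 > 0 then
      ((PySem.List.enumerate xs s).foldl stepA (count, flag, acc)).2.2 ++
        [((PySem.List.enumerate xs s).foldl stepA (count, flag, acc)).1 * 2]
    else ((PySem.List.enumerate xs s).foldl stepA (count, flag, acc)).2.2) =
      acc ++ recA flag count xs := by
  induction xs with
  | nil =>
    intro s count flag acc _
    simp only [PySem.List.enumerate_nil, List.foldl_nil, recA]
    split_ifs <;> simp
  | cons x xs ih =>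
    intro s count flag acc hs
    have hs0 : ¬ (s = 0 ∧ x = 1) := by rintro ⟨h, -⟩; omega
    simp only [PySem.List.enumerate_cons, List.foldl_cons, recA, stepA, hs0, if_false]
    by_cases hx : x = 0
    · simpa [hx] using ih (s + 1) (count + 1) flag acc (by omega)
    · simp only [hx, if_false]
      by_cases hc : count = 0
      · simpa [hc] using ih (s + 1) count flag acc (by omega)
      · simp only [hc, if_false]
        by_cases hf : flag = 0
        · simpa [hf] using ih (s + 1) 0 1 (acc ++ [count * 2]) (by omega)
        · simpa [hf] using ih (s + 1) 0 flag (acc ++ [count]) (by omega)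

theorem chunks_zero_recA (lst : List Int) :
    chunks_zero lst =
      recA (if PySem.List.pyGet? lst 0 = some 1 then 1 else 0) 0 lst := by
  cases lst with
  | nil => rfl
  | cons x xs =>
    rw [chunks_zero_eq]
    simp only [PySem.List.enumerate_cons, List.foldl_cons, PySem.List.pyGet?_zero_cons, zero_add]
    by_cases hx : x = 0
    · have h1 : ¬ x = 1 := by omega
      have hstep : stepA (0, 0, []) (0, x) = (1, 0, []) := by simp [stepA, hx]
      rw [hstep, foldA xs 1 1 0 [] (by omega)]
      simp [recA, hx, h1]
    · by_cases h1 : x = 1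
      · have hstep : stepA (0, 0, []) (0, x) = (0, 1, []) := by simp [stepA, h1]
        rw [hstep, foldA xs 1 0 1 [] (by omega)]
        simp [recA, h1]
      · have hstep : stepA (0, 0, []) (0, x) = (0, 0, []) := by simp [stepA, hx, h1]
        rw [hstep, foldA xs 1 0 0 [] (by omega)]
        simp [recA, hx, h1]

theorem foldB (xs : List Int) : ∀ (gs : List (Int × Int)) (v n : Int),
    xs.foldl stepB (gs ++ [(v, n)]) = gs ++ ext v n xs := by
  induction xs with
  | nil => intro gs v n; simp [ext]
  | cons x xs ih =>
    intro gs v n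
    simp only [List.foldl_cons, stepB, List.getLast?_concat, List.dropLast_concat, ext]
    by_cases hv : v = x
    · simpa [hv] using ih gs x (n + 1)
    · have := ih (gs ++ [(v, n)]) x 1
      simpa [hv, List.append_assoc] using this

-- run-length encoding of the whole list
def grp : List Int → List (Int × Int)
  | [] => []
  | x :: xs => ext x 1 xs

theorem foldB_grp (lst : List Int) : lst.foldl stepB [] = grp lst := by
  cases lst with
  | nil => rfl
  | cons x xs =>
    simp only [List.foldl_cons, grp]
    have h : stepB [] x = [] ++ [(x, 1)] := by simp [stepB]
    rw [h, foldB xs [] x 1, List.nil_append]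

theorem zr_ext (xs : List Int) : ∀ (v n : Int), 1 ≤ n →
    ((ext v n xs).filter (fun p => p.1 = 0)).map (fun p => p.2) =
      if v = 0 then zrAux n xs else zrAux 0 xs := by
  induction xs with
  | nil =>
    intro v n hn
    by_cases hv : v = 0 <;>
      simp [ext, zrAux, hv, show (0:Int) < n by omega]
  | cons x xs ih =>
    intro v n hn
    simp only [ext]
    by_cases hv : v = x
    · subst hv
      rw [if_pos rfl]
      by_cases h0 : v = 0
      · simpa [h0, zrAux] using ih v (n + 1) (by omega)
      · simpa [h0, zrAux] using ih v (n + 1) (by omega)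
    · rw [if_neg hv]
      by_cases h0 : v = 0
      · have hx0 : ¬ (x = 0) := by rw [h0] at hv; omega
        simp [h0, hx0, zrAux, ih x 1 (by omega), show (0:Int) < n by omega]
      · simp [h0, zrAux, ih x 1 (by omega)]

theorem zr_grp (lst : List Int) :
    (((grp lst).filter (fun p => p.1 = 0)).map (fun p => p.2)) = zrAux 0 lst := by
  cases lst with
  | nil => rfl
  | cons x xs =>
    simp only [grp, zr_ext xs x 1 (by omega), zrAux]
    by_cases hx : x = 0 <;> simp [hx]

theorem mapM (zs : List Int) : ∀ (s L : Int) (P Q : Prop) [Decidable P] [Decidable Q],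
    1 ≤ s → L = s + zs.length - 1 →
    (PySem.List.enumerate zs s).map (fun (kn : Int × Int) =>
        if (kn.1 = 0 ∧ P) ∨ (kn.1 = L ∧ Q) then 2 * kn.2 else kn.2) =
      tailMap (decide Q) zs := by
  induction zs with
  | nil => intro s L P Q _ _ _ _; simp [tailMap]
  | cons n rest ih =>
    intro s L P Q _ _ hs hL
    simp only [PySem.List.enumerate_cons, List.map_cons, tailMap]
    by_cases hr : rest = []
    · subst hr
      simp only [List.length_cons, List.length_nil] at hL
      have hsL : s = L := by omega
      have hs0 : ¬ (s = 0) := by omega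
      subst hsL
      by_cases hQ : Q <;> simp [hs0, hQ]
    · have hlen : 1 ≤ rest.length := by
        cases rest with | nil => exact absurd rfl hr | cons a l => simp
      simp only [List.length_cons] at hL
      have hs0 : ¬ (s = 0) := by omega
      have hsL : ¬ (s = L) := by push_cast at hL; omega
      rw [ih (s + 1) L P Q (by omega) (by push_cast at hL ⊢; omega)]
      simp [hs0, hsL, hr]

theorem alt_outB (lst : List Int) :
    chunks_zero_alt lst =
      outB (decide (PySem.List.pyGet? lst 0 ≠ some 1))
        (decide (PySem.List.pyGet? lst (-1) = some 0)) (zrAux 0 lst) := by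
  rw [chunks_zero_alt_eq]
  simp only [foldB_grp, zr_grp]
  cases h : zrAux 0 lst with
  | nil => simp [outB]
  | cons n rest =>
    simp only [PySem.List.enumerate_cons, List.map_cons, outB]
    rw [List.cons_eq_cons]
    constructor
    · -- head element
      have hlen : ((n :: rest).length : Int) - 1 = (rest.length : Int) := by
        simp [List.length_cons]
      rw [hlen]
      by_cases hr : rest = []
      · subst hr
        by_cases hP : PySem.List.pyGet? lst 0 ≠ some 1 <;>
          by_cases hQ : PySem.List.pyGet? lst (-1) = some 0 <;> simp [hP, hQ]
      · have hne : ¬ ((0 : Int) = (rest.length : Int)) := by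
          have h' : rest.length ≠ 0 := fun hh => hr (List.length_eq_zero_iff.mp hh)
          omega
        by_cases hP : PySem.List.pyGet? lst 0 ≠ some 1 <;>
          simp [hP, hne, List.isEmpty_iff, hr]
    · -- tail
      have := mapM rest 1 (((n :: rest).length : Int) - 1)
        (PySem.List.pyGet? lst 0 ≠ some 1) (PySem.List.pyGet? lst (-1) = some 0)
        (by omega) (by simp [List.length_cons])
      simpa using this

theorem outB_false (t : Bool) (zs : List Int) : outB false t zs = tailMap t zs := by
  cases zs with
  | nil => rfl
  | cons n rest =>
    simp only [outB, tailMap, Bool.false_or]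
    by_cases hr : rest = [] <;> simp [hr, tailMap, List.isEmpty_iff]

theorem tb_cons_zero (c : Int) (xs : List Int) (hc : 0 ≤ c) :
    tb c (0 :: xs) = tb (c + 1) xs := by
  cases xs with
  | nil => simp [tb, show (0:Int) < c + 1 by omega]
  | cons y ys =>
    cases hv : (y :: ys).getLast? with
    | none => simp at hv
    | some v => simp [tb, List.getLast?_cons_cons, hv]

theorem tb_cons_nonzero (c x : Int) (xs : List Int) (hx : ¬ x = 0) :
    tb c (x :: xs) = tb 0 xs := by
  cases xs with
  | nil => simp [tb, hx]
  | cons y ys =>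
    cases hv : (y :: ys).getLast? with
    | none => simp at hv
    | some v => simp [tb, List.getLast?_cons_cons, hv]

theorem zr_ne_nil (xs : List Int) : ∀ (c : Int), 0 ≤ c → tb c xs = true →
    zrAux c xs ≠ [] := by
  induction xs with
  | nil =>
    intro c _ ht
    simp only [tb, List.getLast?_nil, decide_eq_true_eq] at ht
    simp [zrAux, ht]
  | cons x xs ih =>
    intro c hc ht
    by_cases hx : x = 0
    · subst hx
      rw [tb_cons_zero c xs hc] at ht
      simpa [zrAux] using ih (c + 1) (by omega) ht
    · rw [tb_cons_nonzero c x xs hx] at ht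
      by_cases h : c > 0
      · simp [zrAux, hx, h]
      · simpa [zrAux, hx, h] using ih 0 (by omega) ht

theorem core (xs : List Int) : ∀ (c flag : Int), 0 ≤ c →
    recA flag c xs = outB (decide (flag = 0)) (tb c xs) (zrAux c xs) := by
  induction xs with
  | nil =>
    intro c flag hc
    by_cases h : c > 0
    · simp only [recA, zrAux, h, if_pos, tb, List.getLast?_nil, outB]
      simp [tailMap, mul_comm]
    · simp [recA, zrAux, h, outB]
  | cons x xs ih =>
    intro c flag hc
    by_cases hx : x = 0
    · subst hx
      rw [tb_cons_zero c xs hc]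
      simpa [recA, zrAux] using ih (c + 1) flag (by omega)
    · rw [tb_cons_nonzero c x xs hx]
      by_cases h : c > 0
      · have hc0 : ¬ (c = 0) := by omega
        have e2 : zrAux c (x :: xs) = c :: zrAux 0 xs := by simp [zrAux, hx, h]
        by_cases hf : flag = 0
        · have e1 : recA flag c (x :: xs) = c * 2 :: recA 1 0 xs := by
            simp [recA, hx, hc0, hf]
          rw [e1, e2, ih 0 1 (by omega),
            show (decide ((1 : Int) = 0)) = false by simp, outB_false,
            show (decide (flag = 0)) = true by simp [hf]]
          simp [outB, mul_comm]
        · have e1 : recA flag c (x :: xs) = c :: recA flag 0 xs := by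
            simp [recA, hx, hc0, hf]
          rw [e1, e2, ih 0 flag (by omega),
            show (decide (flag = 0)) = false by simp [hf], outB_false, outB_false]
          by_cases hz : zrAux 0 xs = []
          · cases ht : tb 0 xs
            · simp [tailMap, hz]
            · exact absurd hz (zr_ne_nil xs 0 (by omega) ht)
          · simp [tailMap, hz]
      · have hc0 : c = 0 := by omega
        subst hc0
        simpa [recA, zrAux, hx] using ih 0 flag (by omega)

theorem tb_pyGet (lst : List Int) :
    tb 0 lst = decide (PySem.List.pyGet? lst (-1) = some 0) := by
  cases lst with
  | nil => simp [tb, PySem.List.pyGet?]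
  | cons x xs =>
    rw [PySem.List.pyGet?_neg_one]
    cases h : (x :: xs).getLast? with
    | none => simp at h
    | some v => by_cases hv : v = 0 <;> simp [tb, h, hv]

-- ===== VERDICT (by name: the statement is the Claim_ definition above) =====
theorem chunks_zero_spec : Claim_equal_chunks_zero := by
  intro lst _
  unfold Spec_chunks_zero
  rw [chunks_zero_recA, alt_outB, ← tb_pyGet, core lst 0 _ (by omega)]
  by_cases h : PySem.List.pyGet? lst 0 = some 1 <;> simp [h]
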